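-- pv_equiv track=rewrite | github.com/cmiao9/adventofcode | 2015/day08/code.py | part1
-- ===== SOURCE A (Python) =====
-- def part1(strings: list) -> int:
--     """
--     Calculates number of string literals minus number of values in memory for list of strings.
--
--     Args:
--         strings (list): List of strings.
--
--     Returns:
--         int: Number of string literals minus number of values in memory.
--     """
--
--     # Loop over list of strings.
--     num_literals, num_memory = 0, 0
--     for s in strings:
--
--         # Count string literals.
--         s_len = len(s)
--         num_literals += s_len
--
--         # Count characters in memory.
--         num_subtract = 2
--
--         # Remove start and end quotes.
--         s = s[1:-1]
--
--         # Check for escape characters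
--         while "\\" in s:
--             i = s.index("\\")
--             if s[i + 1] in ["\\", '"']:
--                 num_subtract += 1
--                 s = s[0:i] + s[i + 2 :]
--             elif s[i + 1] == "x":
--                 num_subtract += 3
--                 s = s[:i] + s[i + 4 :]
--
--         num_memory += s_len - num_subtract
--
--     return num_literals - num_memory
-- ===== SOURCE B (Python) =====
-- def _overhead(s: str) -> int:
--     # 2 for the surrounding quotes, plus 1 per \\ or \" escape, plus 3 per \x.. escape,
--     # found in a single forward scan (no string splicing or rescanning).
--     overhead = 2
--     i = 1
--     end = len(s) - 1
--     while i < end: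
--         if s[i] == "\\":
--             if s[i + 1] == "x":
--                 overhead += 3
--                 i += 4
--             else:
--                 overhead += 1
--                 i += 2
--         else:
--             i += 1
--     return overhead
--
--
-- def part1(strings: list) -> int:
--     return sum(_overhead(s) for s in strings)
-- ===== Notes on version B (the rewrite author's own statement) =====
-- stated objective: simpler
-- what changed: Instead of keeping separate literal/memory totals and repeatedly find-splice-rescanning each string to eliminate escapes, B computes each string's overhead (2 + 1 per backslash-pair escape + 3 per \x.. escape) in one forward index scan and sums the contributions.
import Mathlib
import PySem

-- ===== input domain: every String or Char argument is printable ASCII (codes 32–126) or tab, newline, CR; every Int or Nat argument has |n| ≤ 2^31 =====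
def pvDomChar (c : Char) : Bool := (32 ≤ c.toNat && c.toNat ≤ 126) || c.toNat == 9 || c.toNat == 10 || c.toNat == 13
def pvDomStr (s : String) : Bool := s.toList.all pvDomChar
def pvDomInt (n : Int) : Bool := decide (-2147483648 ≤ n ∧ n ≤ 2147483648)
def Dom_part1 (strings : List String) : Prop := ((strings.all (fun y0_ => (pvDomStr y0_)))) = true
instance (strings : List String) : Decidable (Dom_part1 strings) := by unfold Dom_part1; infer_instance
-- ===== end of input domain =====

-- B replaces A's two running totals and repeated find-splice-rescan of each string by a single
-- forward index scan summing each string's overhead directly (objective: simpler).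

-- ===== PORT A =====
-- A's while loop: find leftmost backslash, classify s[i+1], splice it out, rescan.
-- fuel bounds the iterations (each productive iteration removes ≥ 2 chars); on inputs outside
-- Pre_ the Python raises IndexError (ported: the `none` arm) or loops forever (the final arm).
def part1Go : Nat → List Char → Int → Int
  | 0, _, sub => sub
  | f+1, s, sub =>
    if '\\' ∈ s then
      let i := s.idxOf '\\'                              -- s.index("\\")
      match PySem.List.pyGet? s ((i : Int) + 1) with     -- s[i+1]
      | none => sub                                      -- Python: IndexError (outside Pre_)
      | some c =>
        if c = '\\' ∨ c = '"' then part1Go f (s.take i ++ s.drop (i+2)) (sub + 1)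
        else if c = 'x' then part1Go f (s.take i ++ s.drop (i+4)) (sub + 3)
        else part1Go f s sub                             -- Python: infinite loop (outside Pre_)
    else sub

def part1 (strings : List String) : Int :=
  let r := strings.foldl (fun (acc : Int × Int) str =>
    let l := str.toList
    let sLen : Int := l.length
    let inner := PySem.List.slice l (some 1) (some (-1))   -- s[1:-1]
    let sub := part1Go (inner.length + 1) inner 2
    (acc.1 + sLen, acc.2 + (sLen - sub))) (0, 0)
  r.1 - r.2

-- ===== PORT B =====
-- B's while loop: one forward scan from index 1 to len-1, adding the overhead of each escape.
def overheadGo : Nat → List Char → Int → Int → Int → Int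
  | 0, _, _, _, ov => ov      -- fuel only makes the loop total; it never runs out on the calls below
  | f+1, l, e, i, ov =>
    if i < e then
      match PySem.List.pyGet? l i with                   -- s[i]
      | none => ov                                       -- unreachable in part1_alt's calls
      | some c =>
        if c = '\\' then
          match PySem.List.pyGet? l (i + 1) with         -- s[i+1]
          | none => ov                                   -- unreachable in part1_alt's calls
          | some d =>
            if d = 'x' then overheadGo f l e (i + 4) (ov + 3)
            else overheadGo f l e (i + 2) (ov + 1)
        else overheadGo f l e (i + 1) ov
    else ov

def overheadOf (s : String) : Int :=
  overheadGo (s.toList.length + 1) s.toList ((s.toList.length : Int) - 1) 1 2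

def part1_alt (strings : List String) : Int :=
  strings.foldl (fun a s => a + overheadOf s) 0

-- ===== PRECONDITION & SPEC =====
-- wfInner accepts exactly the string bodies on which A's loop returns: every backslash starts
-- an escape \\ , \" or \x.. (the two chars after \x are arbitrary and may be truncated at the
-- end of the body).  Pre_ excludes only inputs where A raises IndexError (lone trailing
-- backslash) or loops forever (backslash followed by a char outside {\, ", x}); A returns on
-- every input satisfying Pre_.
def wfInner : List Char → Bool
  | [] => true
  | c :: rest =>
    if c = '\\' then
      match rest with
      | [] => false
      | d :: rest' =>
        if d = 'x' then
          match rest' with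
          | _ :: _ :: r => wfInner r
          | _ => true
        else (d = '\\' || d = '"') && wfInner rest'
    else wfInner rest

def Pre_part1 (strings : List String) : Prop :=
  ∀ s ∈ strings, wfInner (PySem.List.slice s.toList (some 1) (some (-1))) = true
instance (strings : List String) : Decidable (Pre_part1 strings) := by
  unfold Pre_part1; infer_instance

def pvWitness_part1 : List String := ["\"a\\\\b\"", ""]

def Spec_part1 (strings : List String) (out : Int) : Prop := out = part1_alt strings
instance (strings : List String) (out : Int) : Decidable (Spec_part1 strings out) := by
  unfold Spec_part1; infer_instance

-- ===== CLAIM (what is proved, stated in full; the proofs are below) =====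
def Claim_equal_part1 : Prop := ∀ (strings : List String), Dom_part1 strings → Pre_part1 strings → Spec_part1 strings (part1 strings)

-- ===== LEMMAS AND PROOFS =====

-- reference count: overhead contributed by the escapes of a string body
def cnt : List Char → Int
  | [] => 0
  | c :: rest =>
    if c = '\\' then
      match rest with
      | [] => 0
      | d :: rest' =>
        if d = 'x' then 3 + cnt (rest'.drop 2)
        else 1 + cnt rest'
    else cnt rest
termination_by l => l.length
decreasing_by all_goals (simp [List.length_drop]; try omega)

theorem cnt_no_bs (p : List Char) (h : '\\' ∉ p) : cnt p = 0 := by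
  induction p using cnt.induct with
  | case1 => simp [cnt]
  | case2 => simp_all
  | case3 => simp_all
  | case4 => simp_all
  | case5 c rest hc ih => rw [cnt.eq_def]; simp_all

theorem cnt_append (p z : List Char) (h : '\\' ∉ p) : cnt (p ++ z) = cnt z := by
  induction p with
  | nil => rfl
  | cons c p' ih =>
    simp only [List.mem_cons, not_or] at h
    rw [List.cons_append, cnt.eq_def]
    simp only [if_neg (fun hc => h.1 (Eq.symm hc))]
    exact ih h.2

theorem wf_append (p z : List Char) (h : '\\' ∉ p) : wfInner (p ++ z) = wfInner z := by
  induction p with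
  | nil => rfl
  | cons c p' ih =>
    simp only [List.mem_cons, not_or] at h
    rw [List.cons_append, wfInner.eq_def]
    simp only [if_neg (fun hc => h.1 (Eq.symm hc))]
    exact ih h.2

theorem split_at_idxOf (t : List Char) (h : '\\' ∈ t) :
    ∃ p u, t = p ++ '\\' :: u ∧ '\\' ∉ p ∧ t.idxOf '\\' = p.length := by
  induction t with
  | nil => simp at h
  | cons c t' ih =>
    by_cases hc : c = '\\'
    · exact ⟨[], t', by simp [hc], by simp, by simp [hc]⟩
    · have hm : '\\' ∈ t' := by
        rcases List.mem_cons.mp h with h1 | h2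
        · exact absurd h1.symm hc
        · exact h2
      obtain ⟨p, u, ht, hp, hi⟩ := ih hm
      refine ⟨c :: p, u, by simp [ht], ?_, ?_⟩
      · simp only [List.mem_cons, not_or]
        exact ⟨fun hx => hc hx.symm, hp⟩
      · simp [hc, hi]

theorem wf_bs_x (rest : List Char) : wfInner ('\\' :: 'x' :: rest) = wfInner (rest.drop 2) := by
  rcases rest with _ | ⟨a, _ | ⟨b, u⟩⟩ <;> simp [wfInner]

theorem wf_bs_other (d : Char) (hd : d ≠ 'x') (rest : List Char) :
    wfInner ('\\' :: d :: rest) = ((d = '\\' || d = '"') && wfInner rest) := by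
  rw [wfInner.eq_def]; simp [hd]

theorem wf_cons (c : Char) (hc : c ≠ '\\') (rest : List Char) : wfInner (c :: rest) = wfInner rest := by
  rw [wfInner.eq_def]; simp [hc]

theorem cnt_bs_x (rest : List Char) : cnt ('\\' :: 'x' :: rest) = 3 + cnt (rest.drop 2) := by
  rw [cnt.eq_def]; simp

theorem cnt_bs_other (d : Char) (hd : d ≠ 'x') (rest : List Char) :
    cnt ('\\' :: d :: rest) = 1 + cnt rest := by
  rw [cnt.eq_def]; simp [hd]

theorem cnt_cons (c : Char) (hc : c ≠ '\\') (rest : List Char) : cnt (c :: rest) = cnt rest := by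
  rw [cnt.eq_def]; simp [hc]

theorem lemA (f : Nat) : ∀ (t : List Char) (sub : Int), wfInner t = true → t.length ≤ f →
    part1Go f t sub = sub + cnt t := by
  induction f with
  | zero =>
    intro t sub _ hlen
    have : t = [] := List.eq_nil_of_length_eq_zero (Nat.le_zero.mp hlen)
    subst this
    simp [part1Go, cnt]
  | succ f ih =>
    intro t sub hwf hlen
    by_cases hm : '\\' ∈ t
    · obtain ⟨p, u, ht, hp, hi⟩ := split_at_idxOf t hm
      have hwfu : wfInner ('\\' :: u) = true := by
        rw [ht, wf_append _ _ hp] at hwf; exact hwf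
      have hcnt : cnt t = cnt ('\\' :: u) := by rw [ht, cnt_append _ _ hp]
      cases u with
      | nil => rw [wfInner.eq_def] at hwfu; simp at hwfu
      | cons d rest =>
        have hget : PySem.List.pyGet? t ((t.idxOf '\\' : Int) + 1) = some d := by
          rw [hi, ht]
          have := PySem.List.pyGet?_append_right (pre := p) (ys := '\\' :: d :: rest) (k := 1)
          simpa using this
        by_cases hd : d = 'x'
        · subst hd
          rw [wf_bs_x] at hwfu
          rw [cnt_bs_x] at hcnt
          have hcond : ¬ ('x' = '\\' ∨ 'x' = '"') := by decide
          rw [part1Go]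
          simp only [if_pos hm, hget, hcond]
          have htake : t.take (t.idxOf '\\') = p := by rw [hi, ht]; simp
          have hdrop : t.drop (t.idxOf '\\' + 4) = rest.drop 2 := by
            rw [hi, ht, List.drop_append]
            simp
          rw [htake, hdrop]
          rw [ih (p ++ rest.drop 2) (sub + 3) (by rw [wf_append _ _ hp]; exact hwfu)
              (by rw [ht] at hlen; simp at hlen ⊢; omega)]
          rw [cnt_append _ _ hp, hcnt]
          simp
          ring
        · rw [wf_bs_other d hd, Bool.and_eq_true] at hwfu
          rw [cnt_bs_other d hd] at hcnt
          have hde : (d = '\\' ∨ d = '"') := by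
            have := hwfu.1
            simp only [Bool.or_eq_true, decide_eq_true_eq] at this
            exact this
          rw [part1Go]
          simp only [if_pos hm, hget, if_pos hde]
          have htake : t.take (t.idxOf '\\') = p := by rw [hi, ht]; simp
          have hdrop : t.drop (t.idxOf '\\' + 2) = rest := by
            rw [hi, ht, List.drop_append]
            simp
          rw [htake, hdrop]
          rw [ih (p ++ rest) (sub + 1) (by rw [wf_append _ _ hp]; exact hwfu.2)
              (by rw [ht] at hlen; simp at hlen ⊢; omega)]
          rw [cnt_append _ _ hp, hcnt]
          ring
    · rw [part1Go]
      simp only [if_neg hm]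
      rw [cnt_no_bs t hm]
      ring

theorem seg_cons (l : List Char) (m j : Nat) (hj : j < m) (hm : m ≤ l.length) :
    (l.take m).drop j = l[j]'(lt_of_lt_of_le hj hm) :: (l.take m).drop (j+1) := by
  rw [List.drop_eq_getElem_cons (by simp [List.length_take]; omega)]
  congr 1
  simp [List.getElem_take]

theorem seg_nil (l : List Char) (m j : Nat) (hj : m ≤ j) : (l.take m).drop j = [] := by
  apply List.drop_eq_nil_of_le
  simp [List.length_take]; omega

theorem lemB (f : Nat) : ∀ (l : List Char) (i ov : Int), 1 ≤ i →
    (((l.length : Int) - 1) - i).toNat < f →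
    wfInner ((l.take ((l.length : Int) - 1).toNat).drop i.toNat) = true →
    overheadGo f l ((l.length : Int) - 1) i ov
      = ov + cnt ((l.take ((l.length : Int) - 1).toNat).drop i.toNat) := by
  induction f with
  | zero => intro l i ov _ hn _; omega
  | succ f ih =>
  intro l i ov h1 hn hwf
  by_cases hlt : i < (l.length : Int) - 1
  · -- loop body runs; l[i] exists
    have hiN : ((i.toNat : Int)) = i := by omega
    have hiNlt : i.toNat < ((l.length : Int) - 1).toNat := by omega
    have hmle : ((l.length : Int) - 1).toNat ≤ l.length := by omega
    have hiL : i.toNat < l.length := by omega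
    have hget1 : PySem.List.pyGet? l i = some (l[i.toNat]'hiL) := by
      rw [PySem.List.pyGet?_of_nonneg l (by omega)]
      simp
    have hseg1 := seg_cons l (((l.length : Int) - 1).toNat) i.toNat hiNlt hmle
    rw [overheadGo]
    simp only [if_pos hlt, hget1]
    by_cases hc : l[i.toNat]'hiL = '\\'
    · -- backslash: read l[i+1]
      have hi1L : i.toNat + 1 < l.length := by omega
      have hget2 : PySem.List.pyGet? l (i + 1) = some (l[i.toNat + 1]'hi1L) := by
        rw [PySem.List.pyGet?_of_nonneg l (by omega)]
        have : (i + 1).toNat = i.toNat + 1 := by omega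
        rw [this]; simp
      simp only [if_pos hc, hget2]
      by_cases he : i + 1 < (l.length : Int) - 1
      · have hi1N : (i+1).toNat = i.toNat + 1 := by omega
        have hi1lt : i.toNat + 1 < ((l.length : Int) - 1).toNat := by omega
        have hseg2 := seg_cons l (((l.length : Int) - 1).toNat) (i.toNat + 1) hi1lt hmle
        by_cases hd : l[i.toNat + 1]'hi1L = 'x'
        · simp only [if_pos hd]
          have hwf' : wfInner (((l.take (((l.length : Int) - 1).toNat)).drop (i.toNat + 1 + 1)).drop 2) = true := by
            rw [hseg1, hc, hseg2, hd, wf_bs_x] at hwf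
            exact hwf
          have hdd : ((l.take (((l.length : Int) - 1).toNat)).drop (i.toNat + 1 + 1)).drop 2
              = (l.take (((l.length : Int) - 1).toNat)).drop ((i + 4).toNat) := by
            rw [List.drop_drop]
            congr 1
            omega
          rw [hdd] at hwf'
          rw [ih l (i + 4) (ov + 3) (by omega) (by omega) hwf']
          rw [hseg1, hc, hseg2, hd, cnt_bs_x, hdd]
          ring
        · simp only [if_neg hd]
          have hwf' : wfInner ((l.take (((l.length : Int) - 1).toNat)).drop ((i + 2).toNat)) = true := by
            rw [hseg1, hc, hseg2, wf_bs_other _ hd, Bool.and_eq_true] at hwf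
            have h2 : (i + 2).toNat = i.toNat + 1 + 1 := by omega
            rw [h2]
            exact hwf.2
          rw [ih l (i + 2) (ov + 1) (by omega) (by omega) hwf']
          rw [hseg1, hc, hseg2, cnt_bs_other _ hd]
          have h2 : (i + 2).toNat = i.toNat + 1 + 1 := by omega
          rw [h2]
          ring
      · -- i + 1 = len - 1: the segment is a lone backslash, contradicting wfInner
        exfalso
        have hi1 : ((l.length : Int) - 1).toNat ≤ i.toNat + 1 := by omega
        rw [hseg1, hc, seg_nil l _ _ hi1, wfInner.eq_def] at hwf
        simp at hwf
    · -- ordinary character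
      simp only [if_neg hc]
      have hwf' : wfInner ((l.take (((l.length : Int) - 1).toNat)).drop ((i + 1).toNat)) = true := by
        rw [hseg1, wf_cons _ hc] at hwf
        have h2 : (i + 1).toNat = i.toNat + 1 := by omega
        rw [h2]
        exact hwf
      rw [ih l (i + 1) ov (by omega) (by omega) hwf']
      rw [hseg1, cnt_cons _ hc]
      have h2 : (i + 1).toNat = i.toNat + 1 := by omega
      rw [h2]
  · -- i ≥ len - 1: loop does not run, segment is empty
    rw [overheadGo]
    simp only [if_neg hlt]
    rw [seg_nil l _ _ (by omega)]
    simp [cnt]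

theorem slice_one_neg_one (l : List Char) :
    PySem.List.slice l (some 1) (some (-1)) = (l.take (((l.length : Int) - 1).toNat)).drop 1 := by
  simp [PySem.List.slice]
  rw [← List.drop_one, List.drop_take]
  cases l <;> simp

theorem perString (s : String) (h : wfInner (PySem.List.slice s.toList (some 1) (some (-1))) = true) :
    part1Go ((PySem.List.slice s.toList (some 1) (some (-1))).length + 1)
        (PySem.List.slice s.toList (some 1) (some (-1))) 2 = overheadOf s := by
  have hsl := slice_one_neg_one s.toList
  rw [lemA _ _ 2 h (by omega)]
  unfold overheadOf
  rw [lemB (s.toList.length + 1) s.toList 1 2 (by omega) (by omega)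
    (by rw [show ((1 : Int)).toNat = 1 from rfl, ← hsl]; exact h)]
  rw [show ((1 : Int)).toNat = 1 from rfl, ← hsl]

theorem foldA_eq (ss : List String)
    (hss : ∀ s ∈ ss, wfInner (PySem.List.slice s.toList (some 1) (some (-1))) = true) :
    ∀ (L M : Int),
    (ss.foldl (fun (acc : Int × Int) str =>
      let l := str.toList
      let sLen : Int := l.length
      let inner := PySem.List.slice l (some 1) (some (-1))
      let sub := part1Go (inner.length + 1) inner 2
      (acc.1 + sLen, acc.2 + (sLen - sub))) (L, M)).1
    - (ss.foldl (fun (acc : Int × Int) str =>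
      let l := str.toList
      let sLen : Int := l.length
      let inner := PySem.List.slice l (some 1) (some (-1))
      let sub := part1Go (inner.length + 1) inner 2
      (acc.1 + sLen, acc.2 + (sLen - sub))) (L, M)).2
    = L - M + (ss.map overheadOf).sum := by
  induction ss with
  | nil => simp
  | cons s ss ih =>
    intro L M
    simp only [List.foldl_cons, List.map_cons, List.sum_cons]
    rw [ih (fun x hx => hss x (List.mem_cons_of_mem _ hx))]
    rw [perString s (hss s List.mem_cons_self)]
    ring

-- ===== VERDICT (by name: the statement is the Claim_ definition above) =====
theorem part1_spec : Claim_equal_part1 := by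
  intro strings hdom hpre
  unfold Spec_part1 part1 part1_alt
  rw [PySem.List.foldl_add strings overheadOf 0]
  simp only []
  rw [foldA_eq strings hpre 0 0]
  ring
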